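-- pv_equiv track=rewrite | github.com/DionEngelen/MachineStrike | domain/src/MoveValidation.py | check_path_right
-- ===== SOURCE A (Python) =====
-- def check_path_down(occupied, tile_to_check, tile_destination, movement_left):
--     while tile_to_check + 8 < tile_destination and movement_left > 0:
--         tile_to_check += 8
--         if tile_to_check == occupied:
--             check_path_zigzag_right(occupied, tile_to_check - 8, tile_destination, movement_left)
--         movement_left -= 1
--     if tile_to_check + 8 == tile_destination and movement_left > 0:
--         return tile_destination
--     if movement_left > 0:
--         check_path_right(occupied, tile_to_check, tile_destination, movement_left)
--     else:
--         return tile_to_check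
--
-- def check_path_right(occupied, tile_to_check, tile_destination, movement_left):
--     while tile_to_check + 1 < tile_destination and movement_left > 0:
--         tile_to_check += 1
--         if tile_to_check == occupied:
--             check_path_zigzag_right(occupied, tile_to_check - 9, tile_destination, movement_left + 1)
--         movement_left -= 1
--     if tile_to_check + 1 == tile_destination and movement_left > 0:
--         return tile_destination
--     else:
--         return tile_to_check
--
-- def check_path_zigzag_right(occupied, tile_to_check, tile_destination, movement_left):
--     if tile_to_check + 1 < tile_destination:
--         tile_to_check += 1
--         if tile_to_check == occupied:
--             check_path_zigzag_right(occupied, tile_to_check - 9, tile_destination, movement_left + 1)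
--         movement_left -= 1
--         check_path_down(occupied, tile_to_check, tile_destination, movement_left)
--     return tile_destination
-- ===== SOURCE B (Python) =====
-- def check_path_right(occupied, tile_to_check, tile_destination, movement_left):
--     gap = tile_destination - tile_to_check - 1
--     if movement_left <= 0 or gap < 0:
--         return tile_to_check
--     if movement_left > gap:
--         return tile_destination
--     return tile_to_check + movement_left
-- ===== Notes on version B (the rewrite author's own statement) =====
-- stated objective: faster
-- what changed: Replaced the step-by-step while loop (one tile per iteration) by a closed-form arithmetic computation of the final tile from the gap to the destination and the remaining movement.
import Mathlib
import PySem

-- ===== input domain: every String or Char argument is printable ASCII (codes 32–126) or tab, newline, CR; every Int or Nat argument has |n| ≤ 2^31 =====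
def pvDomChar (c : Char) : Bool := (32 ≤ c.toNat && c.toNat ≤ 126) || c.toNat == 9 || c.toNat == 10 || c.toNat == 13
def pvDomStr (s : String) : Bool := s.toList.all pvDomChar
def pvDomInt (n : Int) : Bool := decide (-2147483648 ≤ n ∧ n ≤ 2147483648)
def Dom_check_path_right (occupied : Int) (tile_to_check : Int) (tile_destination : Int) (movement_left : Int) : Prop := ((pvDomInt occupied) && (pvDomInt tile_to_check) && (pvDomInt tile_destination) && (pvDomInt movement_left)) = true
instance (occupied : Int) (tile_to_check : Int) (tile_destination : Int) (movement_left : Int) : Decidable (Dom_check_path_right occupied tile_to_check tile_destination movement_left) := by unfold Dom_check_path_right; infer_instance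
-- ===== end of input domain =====

-- B replaces the tile-by-tile while loop with a closed-form arithmetic result (objective: faster).
-- ===== PORT A =====
def check_path_right (occupied : Int) (tile_to_check : Int) (tile_destination : Int) (movement_left : Int) : Int :=
  if tile_to_check + 1 < tile_destination ∧ movement_left > 0 then
    -- loop body: tile_to_check += 1; the check_path_zigzag_right call's result is
    -- discarded in the Python (side-effect-free helpers), so it cannot affect the return value
    check_path_right occupied (tile_to_check + 1) tile_destination (movement_left - 1)
  else if tile_to_check + 1 = tile_destination ∧ movement_left > 0 then
    tile_destination
  else
    tile_to_check
termination_by movement_left.toNat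
decreasing_by omega

-- ===== PORT B =====
def check_path_right_alt (occupied : Int) (tile_to_check : Int) (tile_destination : Int) (movement_left : Int) : Int :=
  let gap := tile_destination - tile_to_check - 1
  if movement_left ≤ 0 ∨ gap < 0 then tile_to_check
  else if movement_left > gap then tile_destination
  else tile_to_check + movement_left

-- ===== PRECONDITION & SPEC =====
def Spec_check_path_right (occupied : Int) (tile_to_check : Int) (tile_destination : Int) (movement_left : Int) (out : Int) : Prop := out = check_path_right_alt occupied tile_to_check tile_destination movement_left
instance (occupied : Int) (tile_to_check : Int) (tile_destination : Int) (movement_left : Int) (out : Int) : Decidable (Spec_check_path_right occupied tile_to_check tile_destination movement_left out) := by unfold Spec_check_path_right; infer_instance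

-- ===== CLAIM (what is proved, stated in full; the proofs are below) =====
def Claim_equal_check_path_right : Prop := ∀ (occupied : Int) (tile_to_check : Int) (tile_destination : Int) (movement_left : Int), Dom_check_path_right occupied tile_to_check tile_destination movement_left → Spec_check_path_right occupied tile_to_check tile_destination movement_left (check_path_right occupied tile_to_check tile_destination movement_left)

-- ===== LEMMAS AND PROOFS =====

-- ===== VERDICT (by name: the statement is the Claim_ definition above) =====
lemma cpr_eq (occupied tile_to_check tile_destination movement_left : Int) :
    check_path_right occupied tile_to_check tile_destination movement_left =
      check_path_right_alt occupied tile_to_check tile_destination movement_left := by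
  fun_induction check_path_right occupied tile_to_check tile_destination movement_left with
  | case1 t m h ih =>
      rw [ih]
      simp only [check_path_right_alt]
      split_ifs <;> omega
  | case2 t m h h2 =>
      simp only [check_path_right_alt]
      split_ifs <;> omega
  | case3 t m h h2 =>
      simp only [check_path_right_alt]
      split_ifs <;> omega

theorem check_path_right_spec : Claim_equal_check_path_right := by
  intro o t d m _
  exact cpr_eq o t d m
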